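-- pv_equiv track=rewrite | github.com/GregoryKucherkov/goit-algo2-hw-03 | task_1/task_1.py | capacity_mtx
-- ===== SOURCE A (Python) =====
-- def capacity_mtx(edges, node_list):
--     # as we use names for the graph edges, we need to get indicies of that nodes
--     node_indices = {node: i for i, node in enumerate(node_list)}
--     num_nodes = len(node_list)
--     capacity_matrix = [[0] * num_nodes for _ in range(num_nodes)]
--
--     for u, v, capacity in edges:
--         capacity_matrix[node_indices[u]][
--             node_indices[v]
--         ] = capacity  # Assign capacity to directed edge
--     return capacity_matrix
-- ===== SOURCE B (Python) =====
-- def capacity_mtx(edges, node_list):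
--     node_indices = {node: i for i, node in enumerate(node_list)}
--     edge_map = {}
--     for u, v, capacity in edges:
--         edge_map[(node_indices[u], node_indices[v])] = capacity
--     num_nodes = len(node_list)
--     return [[edge_map.get((i, j), 0) for j in range(num_nodes)]
--             for i in range(num_nodes)]
-- ===== Notes on version B (the rewrite author's own statement) =====
-- stated objective: alternative
-- what changed: Instead of allocating an n-by-n zero matrix and scattering each edge's capacity into it by mutation, B first indexes the edges in a dict keyed by (row, column) and then gathers every matrix cell with a single nested comprehension lookup.
import Mathlib
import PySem

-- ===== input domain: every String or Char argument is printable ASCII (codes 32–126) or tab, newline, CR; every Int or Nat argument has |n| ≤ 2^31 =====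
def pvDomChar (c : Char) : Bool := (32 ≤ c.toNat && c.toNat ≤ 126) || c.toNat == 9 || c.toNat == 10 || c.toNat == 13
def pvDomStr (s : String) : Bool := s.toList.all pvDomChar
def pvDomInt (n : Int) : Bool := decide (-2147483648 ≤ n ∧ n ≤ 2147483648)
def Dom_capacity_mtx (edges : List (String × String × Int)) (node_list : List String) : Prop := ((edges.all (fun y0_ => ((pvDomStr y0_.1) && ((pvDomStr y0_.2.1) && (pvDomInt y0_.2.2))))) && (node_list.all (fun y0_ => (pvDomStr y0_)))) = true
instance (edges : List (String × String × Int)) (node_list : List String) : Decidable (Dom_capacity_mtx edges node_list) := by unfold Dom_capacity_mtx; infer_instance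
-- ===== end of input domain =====

-- B builds a dict keyed by index pairs and gathers every cell by lookup, instead of A's
-- zero-matrix allocation followed by scattering edge capacities by mutation (alternative decomposition).

-- ===== PORT A =====
-- node_indices = {node: i for i, node in enumerate(node_list)}  (shared line in both Pythons)
def nodeIdxA (node_list : List String) : PySem.Dict String Int :=
  (PySem.List.enumerate node_list).foldl (fun d p => d.insert p.2 p.1) PySem.Dict.empty

def capacity_mtx (edges : List (String × String × Int)) (node_list : List String) : List (List Int) :=
  let node_indices := nodeIdxA node_list
  let num_nodes := node_list.length
  let capacity_matrix := (List.range num_nodes).map (fun _ => List.replicate num_nodes (0 : Int))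
  -- for u, v, capacity in edges: capacity_matrix[node_indices[u]][node_indices[v]] = capacity
  -- indices are in [0, num_nodes) under Pre_, so List.set/toNat is exact there
  edges.foldl (fun m e =>
    let i := ((node_indices.getD e.1 0).toNat)
    let j := ((node_indices.getD e.2.1 0).toNat)
    m.set i (((m[i]?).getD []).set j e.2.2)) capacity_matrix

-- ===== PORT B =====
def nodeIdxB (node_list : List String) : PySem.Dict String Int :=
  (PySem.List.enumerate node_list).foldl (fun d p => d.insert p.2 p.1) PySem.Dict.empty

def capacity_mtx_alt (edges : List (String × String × Int)) (node_list : List String) : List (List Int) :=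
  let node_indices := nodeIdxB node_list
  let edge_map : PySem.Dict (Int × Int) Int :=
    edges.foldl (fun d e => d.insert (node_indices.getD e.1 0, node_indices.getD e.2.1 0) e.2.2)
      PySem.Dict.empty
  let num_nodes := node_list.length
  (List.range num_nodes).map (fun (i : Nat) =>
    (List.range num_nodes).map (fun (j : Nat) => edge_map.getD ((i : Int), (j : Int)) 0))

-- ===== PRECONDITION & SPEC =====
-- Pre_ excludes exactly the edges naming a node absent from node_list, on which Python A raises KeyError.
def Pre_capacity_mtx (edges : List (String × String × Int)) (node_list : List String) : Prop :=
  ∀ e ∈ edges, e.1 ∈ node_list ∧ e.2.1 ∈ node_list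
instance (edges : List (String × String × Int)) (node_list : List String) : Decidable (Pre_capacity_mtx edges node_list) := by unfold Pre_capacity_mtx; infer_instance

def pvWitness_capacity_mtx : (List (String × String × Int)) × List String :=
  ([("a", "b", 5), ("b", "a", 3)], ["a", "b", "c"])

def Spec_capacity_mtx (edges : List (String × String × Int)) (node_list : List String) (out : List (List Int)) : Prop := out = capacity_mtx_alt edges node_list
instance (edges : List (String × String × Int)) (node_list : List String) (out : List (List Int)) : Decidable (Spec_capacity_mtx edges node_list out) := by unfold Spec_capacity_mtx; infer_instance

-- ===== CLAIM (what is proved, stated in full; the proofs are below) =====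
def Claim_equal_capacity_mtx : Prop := ∀ (edges : List (String × String × Int)) (node_list : List String), Dom_capacity_mtx edges node_list → Pre_capacity_mtx edges node_list → Spec_capacity_mtx edges node_list (capacity_mtx edges node_list)

-- ===== LEMMAS AND PROOFS =====

-- the n×n gather of a dict of cells, the shape of B's result
def pvGather (n : Nat) (em : PySem.Dict (Int × Int) Int) : List (List Int) :=
  (List.range n).map (fun (i : Nat) => (List.range n).map (fun (j : Nat) => em.getD ((i : Int), (j : Int)) 0))

theorem nodeIdx_get?_not_mem (xs : List String) (s : Int) (d : PySem.Dict String Int)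
    (u : String) (h : u ∉ xs) :
    ((PySem.List.enumerate xs s).foldl (fun d p => d.insert p.2 p.1) d).get? u = d.get? u := by
  induction xs generalizing s d with
  | nil => simp [PySem.List.enumerate]
  | cons x xs ih =>
    simp only [PySem.List.enumerate_cons, List.foldl_cons]
    rw [ih _ _ (fun hm => h (List.mem_cons_of_mem _ hm))]
    exact PySem.Dict.get?_insert_of_ne _ _ (fun he => h (he ▸ List.mem_cons_self))

theorem nodeIdx_get?_mem (xs : List String) (s : Int) (d : PySem.Dict String Int)
    (u : String) (h : u ∈ xs) :
    ∃ k : Nat, k < xs.length ∧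
      ((PySem.List.enumerate xs s).foldl (fun d p => d.insert p.2 p.1) d).get? u = some (s + k) := by
  induction xs generalizing s d with
  | nil => simp at h
  | cons x xs ih =>
    simp only [PySem.List.enumerate_cons, List.foldl_cons]
    by_cases hm : u ∈ xs
    · obtain ⟨k, hk, he⟩ := ih (s + 1) (d.insert x s) hm
      exact ⟨k + 1, by simp only [List.length_cons]; omega, by rw [he]; congr 1; push_cast; ring⟩
    · have hx : u = x := by rcases List.mem_cons.mp h with h' | h' <;> [exact h'; exact absurd h' hm]
      subst hx
      refine ⟨0, by simp, ?_⟩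
      rw [nodeIdx_get?_not_mem _ _ _ _ hm, PySem.Dict.get?_insert_self]
      norm_num

theorem nodeIdx_bound (node_list : List String) (u : String) (h : u ∈ node_list) :
    0 ≤ (nodeIdxA node_list).getD u 0 ∧
      (nodeIdxA node_list).getD u 0 < (node_list.length : Int) := by
  obtain ⟨k, hk, he⟩ := nodeIdx_get?_mem node_list 0 PySem.Dict.empty u h
  unfold nodeIdxA
  rw [PySem.Dict.getD_eq_get?_getD, he]
  simp only [Option.getD_some]
  omega

theorem pvGather_insert (n : Nat) (em : PySem.Dict (Int × Int) Int) (a b c : Int)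
    (ha0 : 0 ≤ a) (ha : a < (n : Int)) (hb0 : 0 ≤ b) (hb : b < (n : Int)) :
    pvGather n (em.insert (a, b) c)
      = (pvGather n em).set a.toNat ((((pvGather n em)[a.toNat]?).getD []).set b.toNat c) := by
  unfold pvGather
  have haN : a.toNat < n := by omega
  have hrow : ((List.range n).map (fun (i : Nat) => (List.range n).map (fun (j : Nat) => em.getD ((i : Int), (j : Int)) 0)))[a.toNat]?
      = some ((List.range n).map (fun (j : Nat) => em.getD ((a.toNat : Int), (j : Int)) 0)) := by
    rw [List.getElem?_map]
    simp [haN]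
  rw [hrow, Option.getD_some]
  apply List.ext_getElem
  · simp
  · intro i hi hi'
    simp only [List.length_map, List.length_range] at hi
    rw [List.getElem_map, List.getElem_range, List.getElem_set]
    by_cases hia : a.toNat = i
    · rw [if_pos hia]
      subst hia
      apply List.ext_getElem
      · simp
      · intro j hj hj'
        simp only [List.length_map, List.length_range] at hj
        rw [List.getElem_map, List.getElem_range, List.getElem_set, PySem.Dict.getD_insert]
        by_cases hjb : b.toNat = j
        · subst hjb
          rw [if_pos rfl, if_pos (by rw [Int.toNat_of_nonneg ha0, Int.toNat_of_nonneg hb0])]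
        · rw [if_neg hjb, List.getElem_map, List.getElem_range,
            if_neg (by intro hp; exact hjb (by have := congrArg Prod.snd hp; simp at this; omega))]
    · rw [if_neg hia, List.getElem_map, List.getElem_range]
      apply List.ext_getElem
      · simp
      · intro j hj hj'
        simp only [List.length_map, List.length_range] at hj
        rw [List.getElem_map, List.getElem_range, List.getElem_map, List.getElem_range,
          PySem.Dict.getD_insert,
          if_neg (by intro hp; exact hia (by have := congrArg Prod.fst hp; simp at this; omega))]

theorem pvGather_empty (n : Nat) :
    pvGather n PySem.Dict.empty = (List.range n).map (fun _ => List.replicate n (0 : Int)) := by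
  unfold pvGather
  refine List.map_congr_left (fun i _ => ?_)
  simp [PySem.Dict.getD_empty, List.eq_replicate_iff]

theorem scatter_eq_gather (node_list : List String) (edges : List (String × String × Int))
    (hpre : ∀ e ∈ edges, e.1 ∈ node_list ∧ e.2.1 ∈ node_list)
    (em : PySem.Dict (Int × Int) Int) :
    edges.foldl (fun m e =>
        let i := (((nodeIdxA node_list).getD e.1 0).toNat)
        let j := (((nodeIdxA node_list).getD e.2.1 0).toNat)
        m.set i (((m[i]?).getD []).set j e.2.2)) (pvGather node_list.length em)
      = pvGather node_list.length
          (edges.foldl (fun d e =>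
            d.insert ((nodeIdxA node_list).getD e.1 0, (nodeIdxA node_list).getD e.2.1 0) e.2.2) em) := by
  induction edges generalizing em with
  | nil => rfl
  | cons e es ih =>
    simp only [List.foldl_cons]
    obtain ⟨hu, hv⟩ := hpre e List.mem_cons_self
    obtain ⟨hu0, hu1⟩ := nodeIdx_bound node_list e.1 hu
    obtain ⟨hv0, hv1⟩ := nodeIdx_bound node_list e.2.1 hv
    rw [← pvGather_insert node_list.length em _ _ e.2.2 hu0 hu1 hv0 hv1]
    exact ih (fun e' he' => hpre e' (List.mem_cons_of_mem _ he')) _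

-- ===== VERDICT (by name: the statement is the Claim_ definition above) =====
theorem capacity_mtx_spec : Claim_equal_capacity_mtx := by
  intro edges node_list _ hpre
  show capacity_mtx edges node_list = capacity_mtx_alt edges node_list
  simp only [capacity_mtx, capacity_mtx_alt, nodeIdxB]
  rw [← pvGather_empty node_list.length]
  exact scatter_eq_gather node_list edges hpre PySem.Dict.empty
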